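-- pv_equiv track=rewrite | github.com/Harlok13/Julia | julia_bot/apps/library/utils/library_textwrapper.py | _text_wrapper
-- ===== SOURCE A (Python) =====
-- from collections import namedtuple
--
-- def _text_wrapper(text: str, start: int, page_size: int) -> 'PageText':  # type: ignore
--     """
--     Split text into pages.
--
--     :param text: text to be paginated
--     :param start: index from which to start dividing per page
--     :param page_size: maximum page size
--     :return: a named tuple that stores the index of the last
--      character of the page and the text of the page itself
--     """
--     symbols: str = ',.!?:;'
--     end_of_page: int = max(text[start: page_size + start].rfind(symbol)
--                            for symbol in symbols)
--     PageText: namedtuple = namedtuple('PageText', ['page_end', 'text'])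
--     page_with_text: PageText = PageText(page_end=end_of_page + 1,
--                                         text=text[start: end_of_page + start + 1])
--     return page_with_text
-- ===== SOURCE B (Python) =====
-- from collections import namedtuple
--
-- def _text_wrapper(text: str, start: int, page_size: int) -> 'PageText':  # type: ignore
--     """Single reverse scan over the page slice instead of six rfind passes."""
--     s = text[start: page_size + start]
--     end_of_page = -1
--     for i in range(len(s) - 1, -1, -1):
--         if s[i] in ',.!?:;':
--             end_of_page = i
--             break
--     PageText = namedtuple('PageText', ['page_end', 'text'])
--     return PageText(page_end=end_of_page + 1,
--                     text=text[start: end_of_page + start + 1])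
-- ===== Notes on version B (the rewrite author's own statement) =====
-- stated objective: simpler
-- what changed: Replaces the max over six separate rfind scans of the page slice by a single reverse scan that returns the first (i.e. last) index holding any terminator character.
import Mathlib
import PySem

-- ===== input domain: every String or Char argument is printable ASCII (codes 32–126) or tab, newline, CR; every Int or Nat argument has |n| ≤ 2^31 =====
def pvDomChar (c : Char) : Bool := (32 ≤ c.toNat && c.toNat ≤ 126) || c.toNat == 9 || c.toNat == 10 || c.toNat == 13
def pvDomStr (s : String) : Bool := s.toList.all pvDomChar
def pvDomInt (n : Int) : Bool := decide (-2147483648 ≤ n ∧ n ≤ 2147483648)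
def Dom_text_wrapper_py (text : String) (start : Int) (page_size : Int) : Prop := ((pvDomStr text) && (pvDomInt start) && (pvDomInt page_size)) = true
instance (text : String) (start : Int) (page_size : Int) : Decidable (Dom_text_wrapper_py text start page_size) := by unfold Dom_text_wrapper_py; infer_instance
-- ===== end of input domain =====

-- B replaces A's max over six rfind scans of the page slice by one reverse scan for the
-- last terminator character; objective: simpler (one pass instead of six).

-- ===== PORT A =====
-- A: end_of_page = max(text[start:page_size+start].rfind(symbol) for symbol in ',.!?:;')
def text_wrapper_py (text : String) (start : Int) (page_size : Int) : Int × String :=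
  let symbols : List Char := [',', '.', '!', '?', ':', ';']
  let s : List Char := PySem.List.slice text.toList (some start) (some (page_size + start))
  let end_of_page : Int :=
    (PySem.List.max? (symbols.map (fun symbol => PySem.Chars.rfind s [symbol])) (fun y => y)).getD (-1)
    -- the default -1 is unreachable: symbols is nonempty (Python's max raises only on an empty iterable)
  (end_of_page + 1,
   String.ofList (PySem.List.slice text.toList (some start) (some (end_of_page + start + 1))))

-- ===== PORT B =====
-- B's reverse loop: i runs len(s)-1 … 0; we walk s.reverse carrying the index i.
def pvRevScan : List Char → Int → Int
  | [], _ => -1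
  | c :: rest, i => if c ∈ [',', '.', '!', '?', ':', ';'] then i else pvRevScan rest (i - 1)

def text_wrapper_py_alt (text : String) (start : Int) (page_size : Int) : Int × String :=
  let s : List Char := PySem.List.slice text.toList (some start) (some (page_size + start))
  let end_of_page : Int := pvRevScan s.reverse ((s.length : Int) - 1)
  (end_of_page + 1,
   String.ofList (PySem.List.slice text.toList (some start) (some (end_of_page + start + 1))))

-- ===== PRECONDITION & SPEC =====
def Spec_text_wrapper_py (text : String) (start : Int) (page_size : Int) (out : Int × String) : Prop := out = text_wrapper_py_alt text start page_size
instance (text : String) (start : Int) (page_size : Int) (out : Int × String) : Decidable (Spec_text_wrapper_py text start page_size out) := by unfold Spec_text_wrapper_py; infer_instance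

-- ===== CLAIM (what is proved, stated in full; the proofs are below) =====
def Claim_equal_text_wrapper_py : Prop := ∀ (text : String) (start : Int) (page_size : Int), Dom_text_wrapper_py text start page_size → Spec_text_wrapper_py text start page_size (text_wrapper_py text start page_size)

-- ===== LEMMAS AND PROOFS =====

-- A's end_of_page as a function of the slice
def pvMaxRfind (s : List Char) : Int :=
  (PySem.List.max? (([',', '.', '!', '?', ':', ';'] : List Char).map
      (fun symbol => PySem.Chars.rfind s [symbol])) (fun y => y)).getD (-1)

lemma pvGo_le (s sub : List Char) (j : Nat) : PySem.Chars.rfind.go s sub j ≤ (j : Int) := by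
  induction j with
  | zero => simp [PySem.Chars.rfind.go]; split <;> simp
  | succ j ih =>
      simp only [PySem.Chars.rfind.go]
      split
      · simp
      · exact le_trans ih (by exact_mod_cast Nat.le_succ j)

lemma pvRfind_le (s sub : List Char) : PySem.Chars.rfind s sub ≤ (s.length : Int) := by
  simpa [PySem.Chars.rfind] using pvGo_le s sub s.length

lemma pvGo_append (t : List Char) (c d : Char) :
    ∀ j, j < t.length → PySem.Chars.rfind.go (t ++ [c]) [d] j = PySem.Chars.rfind.go t [d] j := by
  intro j
  induction j with
  | zero =>
      intro h
      cases t with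
      | nil => simp at h
      | cons a u => simp [PySem.Chars.rfind.go, List.isPrefixOf]
  | succ j ih =>
      intro h
      have hdrop : List.drop (j + 1) (t ++ [c]) = List.drop (j + 1) t ++ [c] :=
        List.drop_append_of_le_length (by omega)
      have hne : List.drop (j + 1) t ≠ [] := by
        intro hnil
        have := List.drop_eq_nil_iff.mp hnil
        omega
      obtain ⟨a, u, hu⟩ := List.exists_cons_of_ne_nil hne
      simp only [PySem.Chars.rfind.go, hdrop, hu, List.cons_append, List.isPrefixOf,
        ih (by omega)]

lemma pvRfind_append (t : List Char) (c d : Char) :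
    PySem.Chars.rfind (t ++ [c]) [d] =
      if d = c then (t.length : Int) else PySem.Chars.rfind t [d] := by
  have hfalse : ([d] : List Char).isPrefixOf (List.drop (t.length + 1) (t ++ [c])) = false := by
    simp
  simp only [PySem.Chars.rfind, List.length_append, List.length_cons, List.length_nil]
  simp only [PySem.Chars.rfind.go, hfalse, Bool.false_eq_true, if_false]
  -- now at go (t++[c]) [d] t.length
  have hdropn : List.drop t.length (t ++ [c]) = [c] := by
    simp
  by_cases hd : d = c
  · cases t with
    | nil => simp [PySem.Chars.rfind.go, hd, List.isPrefixOf]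
    | cons a u =>
        simp only [List.length_cons, PySem.Chars.rfind.go]
        rw [show u.length + 1 = (a :: u).length from rfl, hdropn]
        simp [hd, List.isPrefixOf]
  · rw [if_neg hd]
    cases t with
    | nil => simp [PySem.Chars.rfind.go, hd, List.isPrefixOf]
    | cons a u =>
        simp only [List.length_cons, PySem.Chars.rfind.go]
        rw [show u.length + 1 = (a :: u).length from rfl, hdropn]
        have hpc : ([d] : List Char).isPrefixOf [c] = false := by
          simp [List.isPrefixOf, hd]
        rw [hpc]
        simp only [Bool.false_eq_true, if_false]
        rw [pvGo_append (a :: u) c d u.length (by simp)]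
        have htop : ([d] : List Char).isPrefixOf (List.drop (u.length + 1) (a :: u)) = false := by
          simp
        simp only [List.length_cons, htop, Bool.false_eq_true, if_false]

lemma pvMaxRfind_nil : pvMaxRfind [] = -1 := by decide

lemma pvMaxRfind_eq (s : List Char) :
    pvMaxRfind s =
      ([PySem.Chars.rfind s ['.'], PySem.Chars.rfind s ['!'], PySem.Chars.rfind s ['?'],
        PySem.Chars.rfind s [':'], PySem.Chars.rfind s [';']]).foldl max
        (PySem.Chars.rfind s [',']) := by
  simp only [pvMaxRfind, List.map]
  rw [PySem.List.max?_id_cons]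
  rfl

lemma pvMaxRfind_append (t : List Char) (c : Char) :
    pvMaxRfind (t ++ [c]) =
      if c ∈ [',', '.', '!', '?', ':', ';'] then (t.length : Int) else pvMaxRfind t := by
  have m1 := pvRfind_le t [','];  have m2 := pvRfind_le t ['.']
  have m3 := pvRfind_le t ['!'];  have m4 := pvRfind_le t ['?']
  have m5 := pvRfind_le t [':'];  have m6 := pvRfind_le t [';']
  rw [pvMaxRfind_eq, pvMaxRfind_eq]
  simp only [pvRfind_append, List.foldl]
  by_cases hc : c ∈ ([',', '.', '!', '?', ':', ';'] : List Char)
  · rw [if_pos hc]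
    fin_cases hc <;> simp [max_def] <;> split_ifs <;> omega
  · rw [if_neg hc]
    simp only [List.mem_cons, List.not_mem_nil, or_false] at hc
    push Not at hc
    obtain ⟨n1, n2, n3, n4, n5, n6⟩ := hc
    simp [Ne.symm n1, Ne.symm n2, Ne.symm n3, Ne.symm n4, Ne.symm n5, Ne.symm n6]

lemma pvScan_eq_max (s : List Char) :
    pvRevScan s.reverse ((s.length : Int) - 1) = pvMaxRfind s := by
  induction s using List.reverseRecOn with
  | nil => simpa using pvMaxRfind_nil.symm
  | append_singleton t c ih =>
      rw [pvMaxRfind_append]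
      simp only [List.reverse_append, List.reverse_singleton, List.singleton_append,
        List.length_append, List.length_cons, List.length_nil, pvRevScan]
      push_cast
      split
      · ring_nf
      · simpa using ih

-- ===== VERDICT (by name: the statement is the Claim_ definition above) =====
theorem text_wrapper_py_spec : Claim_equal_text_wrapper_py := by
  intro text start page_size _
  unfold Spec_text_wrapper_py text_wrapper_py text_wrapper_py_alt
  simp only []
  rw [pvScan_eq_max]
  simp only [pvMaxRfind]
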